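-- pv_equiv track=rewrite | github.com/AiZhanghan/Leetcode | 秋招/美团/3.py | func
-- ===== SOURCE A (Python) =====
-- def func(n, a):
--     """
--     Args:
--         n: int
--         a: list[int]
--     """
--     res = 0
--     for i in range(1, n + 1):
--         bi = a[i - 1]
--         for j in range(1, n + 1):
--             bi ^= i % j
--         res ^= bi
--     return res
-- ===== SOURCE B (Python) =====
-- def _xor_upto(k):
--     # XOR of 0..k in closed form
--     m = k % 4
--     if m == 0:
--         return k
--     if m == 1:
--         return 1
--     if m == 2:
--         return k + 1
--     return 0
--
-- def func(n, a):
--     """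
--     Args:
--         n: int
--         a: list[int]
--     """
--     if n <= 0:
--         return 0
--     res = 0
--     for j in range(1, n + 1):
--         q = n // j
--         r = n % j
--         t = _xor_upto(r)
--         if q % 2 == 1:
--             t ^= _xor_upto(j - 1)
--         res ^= t
--     for v in a[:n]:
--         res ^= v
--     return res
-- ===== Notes on version B (the rewrite author's own statement) =====
-- stated objective: faster
-- what changed: B replaces the O(n^2) double loop by an O(n) pass: the result is (XOR of a[:n]) ^ XOR over j of XOR_{i=1..n}(i%j), and for each j that inner XOR is computed in O(1) from the periodicity of i%j and the closed form for XOR(0..k).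
import Mathlib
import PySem

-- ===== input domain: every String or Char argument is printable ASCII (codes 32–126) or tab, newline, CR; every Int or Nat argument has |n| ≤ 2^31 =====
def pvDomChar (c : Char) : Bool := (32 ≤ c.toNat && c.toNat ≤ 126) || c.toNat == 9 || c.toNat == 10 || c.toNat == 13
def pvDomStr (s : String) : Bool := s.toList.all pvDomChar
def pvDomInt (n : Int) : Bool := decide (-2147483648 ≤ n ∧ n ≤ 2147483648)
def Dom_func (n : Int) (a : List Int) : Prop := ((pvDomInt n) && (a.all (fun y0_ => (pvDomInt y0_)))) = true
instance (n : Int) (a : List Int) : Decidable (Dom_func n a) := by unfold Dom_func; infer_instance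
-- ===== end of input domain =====

-- B computes the same XOR in one pass: res = XOR(a[:n]) ^ XOR_j XOR_i (i%j), with the inner
-- XOR obtained per j in O(1) from the period-j structure of i%j and the closed form of XOR(0..k).

-- ===== PORT A =====
def func (n : Int) (a : List Int) : Int :=
  (PySem.List.pyRange 1 (n + 1) 1).foldl (fun res i =>
    let bi := PySem.List.pyGetD a (i - 1) 0   -- a[i - 1]; Pre_func keeps the index in range
    let bi := (PySem.List.pyRange 1 (n + 1) 1).foldl
      (fun bi j => PySem.Int.bxor bi (PySem.Int.mod i j)) bi
    PySem.Int.bxor res bi) 0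

-- ===== PORT B =====
-- _xor_upto(k) = XOR of 0..k, closed form
def xorUpto (k : Int) : Int :=
  let m := PySem.Int.mod k 4
  if m = 0 then k
  else if m = 1 then 1
  else if m = 2 then k + 1
  else 0

def func_alt (n : Int) (a : List Int) : Int :=
  if n ≤ 0 then 0
  else
    let res := (PySem.List.pyRange 1 (n + 1) 1).foldl (fun res j =>
      let q := PySem.Int.floordiv n j
      let r := PySem.Int.mod n j
      let t := xorUpto r
      let t := if PySem.Int.mod q 2 = 1 then PySem.Int.bxor t (xorUpto (j - 1)) else t
      PySem.Int.bxor res t) 0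
    (PySem.List.slice a none (some n)).foldl (fun res v => PySem.Int.bxor res v) res

-- ===== PRECONDITION & SPEC =====
-- A reads a[i-1] for i = 1..n and raises IndexError when len(a) < n; exactly those inputs are excluded.
def Pre_func (n : Int) (a : List Int) : Prop := n ≤ (a.length : Int)
instance (n : Int) (a : List Int) : Decidable (Pre_func n a) := by unfold Pre_func; infer_instance
def pvWitness_func : Int × List Int := (3, [5, -2, 7])

def Spec_func (n : Int) (a : List Int) (out : Int) : Prop := out = func_alt n a
instance (n : Int) (a : List Int) (out : Int) : Decidable (Spec_func n a out) := by unfold Spec_func; infer_instance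

-- ===== CLAIM (what is proved, stated in full; the proofs are below) =====
def Claim_equal_func : Prop := ∀ (n : Int) (a : List Int), Dom_func n a → Pre_func n a → Spec_func n a (func n a)

-- ===== LEMMAS AND PROOFS =====

-- PySem.Int.bxor agrees with Mathlib's Int.xor, giving associativity.
theorem bxor_eq_xor (a b : Int) : PySem.Int.bxor a b = Int.xor a b := by
  unfold PySem.Int.bxor
  rcases a with m | m <;> rcases b with k | k <;>
    simp [Int.xor, Int.negSucc_eq] <;> omega

theorem ixor_assoc (a b c : Int) : Int.xor (Int.xor a b) c = Int.xor a (Int.xor b c) := by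
  rcases a with m | m <;> rcases b with k | k <;> rcases c with l | l <;>
    simp [Int.xor, Nat.xor_assoc]

theorem bxor_assoc (a b c : Int) :
    PySem.Int.bxor (PySem.Int.bxor a b) c = PySem.Int.bxor a (PySem.Int.bxor b c) := by
  simp [bxor_eq_xor, ixor_assoc]

theorem bxor_zero_left (a : Int) : PySem.Int.bxor 0 a = a := by
  rw [PySem.Int.bxor_comm, PySem.Int.bxor_zero]

theorem bxor_left_comm (a b c : Int) :
    PySem.Int.bxor a (PySem.Int.bxor b c) = PySem.Int.bxor b (PySem.Int.bxor a c) := by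
  rw [← bxor_assoc, PySem.Int.bxor_comm a b, bxor_assoc]

-- xf f l = XOR of f over l
def xf {α : Type} (f : α → Int) (l : List α) : Int :=
  l.foldl (fun s x => PySem.Int.bxor s (f x)) 0

theorem foldl_bxor_init {α : Type} (f : α → Int) (l : List α) (c : Int) :
    l.foldl (fun s x => PySem.Int.bxor s (f x)) c = PySem.Int.bxor c (xf f l) := by
  induction l generalizing c with
  | nil => simp [xf, PySem.Int.bxor_zero]
  | cons x t ih =>
      simp only [xf, List.foldl_cons, bxor_zero_left]
      rw [ih, ih (f x), ← bxor_assoc]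

theorem xf_cons {α : Type} (f : α → Int) (x : α) (t : List α) :
    xf f (x :: t) = PySem.Int.bxor (f x) (xf f t) := by
  simp only [xf, List.foldl_cons, bxor_zero_left]
  exact foldl_bxor_init f t (f x)

theorem xf_zero {α : Type} (l : List α) : xf (fun _ => (0 : Int)) l = 0 := by
  induction l with
  | nil => rfl
  | cons x t ih => rw [xf_cons, ih, PySem.Int.bxor_zero]

theorem xf_add {α : Type} (f g : α → Int) (l : List α) :
    xf (fun x => PySem.Int.bxor (f x) (g x)) l = PySem.Int.bxor (xf f l) (xf g l) := by
  induction l with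
  | nil => simp [xf]
  | cons x t ih =>
      rw [xf_cons, xf_cons, xf_cons, ih]
      rw [bxor_assoc, bxor_left_comm (g x), ← bxor_assoc]

theorem xf_swap {α β : Type} (h : α → β → Int) (l1 : List α) (l2 : List β) :
    xf (fun i => xf (fun j => h i j) l2) l1 = xf (fun j => xf (fun i => h i j) l1) l2 := by
  induction l1 with
  | nil =>
      show (0 : Int) = xf (fun _ => xf _ ([] : List α)) l2
      rw [show (fun (j : β) => xf (fun i => h i j) ([] : List α)) = fun _ => (0:Int) from rfl]
      rw [xf_zero]
  | cons x t ih =>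
      rw [xf_cons, ih, ← xf_add]
      exact congrArg (fun F => xf F l2) (funext fun j => (xf_cons (fun i => h i j) x t).symm)

theorem xf_map {α β : Type} (f : β → Int) (g : α → β) (l : List α) :
    xf f (l.map g) = xf (fun x => f (g x)) l := by
  simp [xf, List.foldl_map]

theorem xf_append {α : Type} (f : α → Int) (l1 l2 : List α) :
    xf f (l1 ++ l2) = PySem.Int.bxor (xf f l1) (xf f l2) := by
  simp only [xf, List.foldl_append]
  exact foldl_bxor_init f l2 (xf f l1)

-- Nat-side XOR machinery
def xfN (f : Nat → Nat) (N : Nat) : Nat :=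
  (List.range N).foldl (fun s t => s ^^^ f t) 0

theorem xfN_succ (f : Nat → Nat) (N : Nat) : xfN f (N + 1) = xfN f N ^^^ f N := by
  simp [xfN, List.range_succ]

theorem xf_cast (g : Nat → Nat) (N : Nat) :
    xf (fun t => ((g t : Nat) : Int)) (List.range N) = ((xfN g N : Nat) : Int) := by
  induction N with
  | zero => rfl
  | succ m ih =>
      rw [List.range_succ, xf_append, ih, xfN_succ]
      rw [xf_cons]
      show PySem.Int.bxor _ (PySem.Int.bxor (g m) (xf _ [])) = _
      simp [xf, PySem.Int.bxor_zero, PySem.Int.bxor_natCast]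

-- closed form for XOR(0..k) over Nat
def Xn (k : Nat) : Nat :=
  if k % 4 = 0 then k else if k % 4 = 1 then 1 else if k % 4 = 2 then k + 1 else 0

theorem even_xor_succ (t : Nat) : (2 * t) ^^^ (2 * t + 1) = 1 := by
  apply Nat.eq_of_testBit_eq
  intro i
  cases i with
  | zero => simp [Nat.testBit_zero]
  | succ i =>
      rw [Nat.testBit_xor]
      simp [Nat.testBit_succ, Nat.mul_add_div]

theorem xor_one_even (t : Nat) : (1 : Nat) ^^^ (2 * t) = 2 * t + 1 := by
  conv_lhs => rw [← even_xor_succ t]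
  rw [Nat.xor_comm (2*t) (2*t+1), Nat.xor_assoc, Nat.xor_self, Nat.xor_zero]

theorem Xn_succ (k : Nat) : Xn (k + 1) = Xn k ^^^ (k + 1) := by
  unfold Xn
  have h4 : k % 4 = 0 ∨ k % 4 = 1 ∨ k % 4 = 2 ∨ k % 4 = 3 := by omega
  rcases h4 with h | h | h | h
  · simp only [h, show (k+1) % 4 = 1 by omega]
    simp only [Nat.one_ne_zero, if_false, if_true, Nat.zero_ne_one]
    obtain ⟨t, rfl⟩ : ∃ t, k = 2 * t := ⟨k / 2, by omega⟩
    exact (even_xor_succ t).symm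
  · simp only [h, show (k+1) % 4 = 2 by omega]
    norm_num
    obtain ⟨t, ht⟩ : ∃ t, k + 1 = 2 * t := ⟨(k+1) / 2, by omega⟩
    rw [ht, xor_one_even]
  · simp only [h, show (k+1) % 4 = 3 by omega]
    norm_num
  · simp only [h, show (k+1) % 4 = 0 by omega]
    norm_num

-- the per-j block/period decomposition of XOR_{i=1..N} (i % j)
theorem keyBlock (j : Nat) (hj : 0 < j) (N : Nat) :
    xfN (fun t => (t + 1) % j) N
      = (if (N / j) % 2 = 1 then Xn (j - 1) else 0) ^^^ Xn (N % j) := by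
  induction N with
  | zero => simp [xfN, Xn]
  | succ N ih =>
      rw [xfN_succ, ih]
      have hd := Nat.div_add_mod N j
      have hm : N % j < j := Nat.mod_lt N hj
      by_cases hr : N % j + 1 < j
      · have e1 : (N + 1) / j = N / j := by
          rw [show N + 1 = j * (N / j) + (N % j + 1) by omega,
            Nat.mul_add_div hj, Nat.div_eq_of_lt hr]; omega
        have e2 : (N + 1) % j = N % j + 1 := by
          conv_lhs => rw [show N + 1 = j * (N / j) + (N % j + 1) by omega]
          rw [Nat.mul_add_mod, Nat.mod_eq_of_lt hr]
        rw [e1, e2, Xn_succ, ← Nat.xor_assoc]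
      · have hrj : N % j + 1 = j := by omega
        have hmul : j * (N / j + 1) = j * (N / j) + j := by ring
        have e1 : (N + 1) / j = N / j + 1 := by
          rw [show N + 1 = j * (N / j + 1) by omega, Nat.mul_div_cancel_left _ hj]
        have e2 : (N + 1) % j = 0 := by
          rw [show N + 1 = j * (N / j + 1) by omega, Nat.mul_mod_right]
        rw [e1, e2]
        have hXn0 : Xn 0 = 0 := by simp [Xn]
        rw [hXn0, Nat.xor_zero]
        have hNj : N % j = j - 1 := by omega
        rw [hNj]
        by_cases hq : (N / j) % 2 = 1
        · rw [if_pos hq, if_neg (by omega), Nat.xor_self]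
          rfl
        · rw [if_neg hq, if_pos (by omega), Nat.zero_xor, Nat.xor_zero]

theorem xorUpto_natCast (k : Nat) : xorUpto (k : Int) = ((Xn k : Nat) : Int) := by
  unfold xorUpto Xn
  rw [show (4:Int) = ((4:Nat):Int) from rfl, PySem.Int.mod_natCast]
  split_ifs <;> push_cast <;> omega

theorem take_eq_map_getD {a : List Int} {N : Nat} (h : N ≤ a.length) :
    a.take N = (List.range N).map (fun t => a.getD t 0) := by
  apply List.ext_getElem
  · simp [h]
  · intro i h1 h2
    simp only [List.getElem_take, List.getElem_map, List.getElem_range]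
    rw [List.getD_eq_getElem a 0 (by simp at h1; omega)]

theorem main_equiv (n : Int) (a : List Int) (hpre : n ≤ (a.length : Int)) :
    func n a = func_alt n a := by
  by_cases hn : n ≤ 0
  · unfold func func_alt
    rw [if_pos hn, PySem.List.pyRange_one_eq_nil (by omega)]
    rfl
  · set N := n.toNat with hNdef
    have hn' : n = (N : Int) := by omega
    have hlen : N ≤ a.length := by omega
    have hR : PySem.List.pyRange 1 (n + 1) 1 = (List.range N).map (fun (t : Nat) => 1 + (t:Int)) := by
      rw [PySem.List.pyRange_one, show (n + 1 - 1).toNat = N by omega]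
    -- A's nested fold, flattened
    have hfunc : func n a = PySem.Int.bxor
        (xf (fun i => PySem.List.pyGetD a (i - 1) 0) (PySem.List.pyRange 1 (n + 1) 1))
        (xf (fun i => xf (fun j => PySem.Int.mod i j) (PySem.List.pyRange 1 (n + 1) 1))
          (PySem.List.pyRange 1 (n + 1) 1)) := by
      unfold func
      simp only [foldl_bxor_init]
      rw [bxor_zero_left, xf_add]
    -- B, flattened
    have hfalt : func_alt n a = PySem.Int.bxor
        (xf (fun j =>
          if PySem.Int.mod (PySem.Int.floordiv n j) 2 = 1
          then PySem.Int.bxor (xorUpto (PySem.Int.mod n j)) (xorUpto (j - 1))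
          else xorUpto (PySem.Int.mod n j)) (PySem.List.pyRange 1 (n + 1) 1))
        (xf (fun v => v) (a.take N)) := by
      unfold func_alt
      rw [if_neg (by omega)]
      dsimp only
      rw [PySem.List.slice_to a (by omega : (0:Int) ≤ n), hNdef]
      exact foldl_bxor_init (fun v => v) (a.take N) _
    -- the a-part of A equals B's XOR over a[:n]
    have hA : xf (fun i => PySem.List.pyGetD a (i - 1) 0) (PySem.List.pyRange 1 (n + 1) 1)
        = xf (fun v => v) (a.take N) := by
      rw [hR, xf_map, take_eq_map_getD hlen, xf_map]
      refine congrArg (fun F => xf F (List.range N)) (funext fun t => ?_)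
      rw [show 1 + (t:Int) - 1 = ((t:Nat):Int) by ring, PySem.List.pyGetD_natCast]
    -- the mod-part of A (after swapping the two folds) equals B's per-j closed form
    have hper : ∀ k : Nat,
        xf (fun i => PySem.Int.mod i (1 + (k:Int))) (PySem.List.pyRange 1 (n + 1) 1)
        = (if PySem.Int.mod (PySem.Int.floordiv n (1 + (k:Int))) 2 = 1
           then PySem.Int.bxor (xorUpto (PySem.Int.mod n (1 + (k:Int)))) (xorUpto (1 + (k:Int) - 1))
           else xorUpto (PySem.Int.mod n (1 + (k:Int)))) := by
      intro k
      have hc1 : (1 + (k:Int)) = (((k+1 : Nat)):Int) := by push_cast; ring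
      rw [hR, xf_map]
      have hfn : (fun t : Nat => PySem.Int.mod (1 + (t:Int)) (1 + (k:Int)))
          = fun t : Nat => (((((t+1) % (k+1) : Nat)):Int)) := by
        funext t
        rw [hc1, show 1 + (t:Int) = (((t+1 : Nat)):Int) by push_cast; ring,
          PySem.Int.mod_natCast]
      rw [hfn, xf_cast, keyBlock (k+1) (by omega) N]
      rw [hc1, hn', PySem.Int.floordiv_natCast, PySem.Int.mod_natCast]
      rw [show (2:Int) = ((2:Nat):Int) from rfl, PySem.Int.mod_natCast]
      rw [show (((k+1:Nat)):Int) - 1 = ((k:Nat):Int) by push_cast; ring]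
      rw [xorUpto_natCast, xorUpto_natCast, PySem.Int.bxor_natCast]
      rw [show (k + 1) - 1 = k from rfl]
      by_cases hq : (N / (k+1)) % 2 = 1
      · rw [if_pos hq, if_pos (by exact_mod_cast congrArg (Nat.cast : Nat → Int) hq)]
        rw [Nat.xor_comm]
      · rw [if_neg hq, if_neg (by exact_mod_cast fun h => hq (by exact_mod_cast h)), Nat.zero_xor]
    have hM : xf (fun i => xf (fun j => PySem.Int.mod i j) (PySem.List.pyRange 1 (n + 1) 1))
          (PySem.List.pyRange 1 (n + 1) 1)
        = xf (fun j =>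
          if PySem.Int.mod (PySem.Int.floordiv n j) 2 = 1
          then PySem.Int.bxor (xorUpto (PySem.Int.mod n j)) (xorUpto (j - 1))
          else xorUpto (PySem.Int.mod n j)) (PySem.List.pyRange 1 (n + 1) 1) := by
      rw [xf_swap, hR, xf_map, xf_map]
      refine congrArg (fun F => xf F (List.range N)) (funext fun k => ?_)
      rw [← hR]
      exact hper k
    rw [hfunc, hfalt, hA, hM, PySem.Int.bxor_comm]

-- ===== VERDICT (by name: the statement is the Claim_ definition above) =====
theorem func_spec : Claim_equal_func := by
  intro n a _ hpre
  unfold Spec_func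
  exact main_equiv n a hpre
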